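-- pv_equiv track=rewrite | github.com/LeopoldACC/Algorithm | 周赛/205/2.py | count
-- ===== SOURCE A (Python) =====
-- def count(nums1, nums2):
--     cnt1 = {}
--     cnt2 = {}
--     muti = {}
--     k = 100007
--     for num in nums1:
--         cnt1[num] = cnt1.get(num,0)+1
--     for num in nums2:
--         cnt2[num] = cnt2.get(num,0)+1
--     visit = set()
--     for i in cnt2:
--         for j in cnt2:
--             if (i,j) in visit or (j,i) in visit:
--                 continue
--             visit.add((i,j))
--             if i==j:
--                 muti[i*j] = muti.get(i*j,0)+cnt2[i]*(cnt2[i]-1)//2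
--                 #WA  muti[i*j] = cnt2[i]*(cnt2[i]-1)//2
--                 ##没考虑1*4 = 4 和 2*2重叠的情况,导致直接赋值覆盖原值而不是加上去
--             else:
--                 muti[i*j] = muti.get(i*j,0)+cnt2[i]*cnt2[j]
--     res = 0
--     for num in cnt1:
--         num2 = num**2
--         if num2 in muti:
--             res+=cnt1[num]*muti[num2]
--     return res
-- ===== SOURCE B (Python) =====
-- def count(nums1, nums2):
--     cnt1 = {}
--     for v in nums1:
--         cnt1[v] = cnt1.get(v, 0) + 1
--     cnt2 = {}
--     for v in nums2:
--         cnt2[v] = cnt2.get(v, 0) + 1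
--     n = len(nums2)
--     z = cnt2.get(0, 0)
--     res = 0
--     for x in cnt1:
--         s = x * x
--         if s == 0:
--             p = z * (n - z) + z * (z - 1) // 2
--         else:
--             p = 0
--             for d in cnt2:
--                 if d != 0 and s % d == 0:
--                     e = s // d
--                     if d == e:
--                         p += cnt2[d] * (cnt2[d] - 1) // 2
--                     elif d < e and e in cnt2:
--                         p += cnt2[d] * cnt2[e]
--         res += cnt1[x] * p
--     return res
-- ===== Notes on version B (the rewrite author's own statement) =====
-- stated objective: faster
-- what changed: Instead of precomputing every pairwise product of nums2's distinct values with a quadratic double loop guarded by a visited-pair set and then looking squares up, B counts the distinct values once and, for each distinct nums1 value x, scans the distinct nums2 values as candidate divisors of x*x (with a closed-form special case for x = 0).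
import Mathlib
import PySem

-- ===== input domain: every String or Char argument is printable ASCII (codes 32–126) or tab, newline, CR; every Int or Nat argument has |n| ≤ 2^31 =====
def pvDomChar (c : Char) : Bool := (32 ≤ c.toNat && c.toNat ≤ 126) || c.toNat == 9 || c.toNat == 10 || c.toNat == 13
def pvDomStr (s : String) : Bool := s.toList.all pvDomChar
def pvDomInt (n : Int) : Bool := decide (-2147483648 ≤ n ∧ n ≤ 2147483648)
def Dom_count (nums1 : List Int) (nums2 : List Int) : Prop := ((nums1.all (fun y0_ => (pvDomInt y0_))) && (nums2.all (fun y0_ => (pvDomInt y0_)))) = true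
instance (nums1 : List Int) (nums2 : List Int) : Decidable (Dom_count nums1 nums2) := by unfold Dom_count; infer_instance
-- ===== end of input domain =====

-- B replaces A's precomputation of every pairwise product of nums2's distinct values
-- (a quadratic double loop over the distinct values with a visited-pair set) by a
-- divisor scan of the distinct values for each distinct nums1 value.

-- ===== PORT A =====
-- (the unused local constant k = 100007 of the Python is dropped; cnt2[i]/cnt1[num]/muti[num2]
--  are read with getD _ 0, exact because those keys are always present at the read)
def count (nums1 : List Int) (nums2 : List Int) : Int :=
  let cnt1 := nums1.foldl (fun d num => d.insert num (d.getD num 0 + 1)) PySem.Dict.empty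
  let cnt2 := nums2.foldl (fun d num => d.insert num (d.getD num 0 + 1)) PySem.Dict.empty
  let st := cnt2.keys.foldl (fun (st : PySem.Set (Int × Int) × PySem.Dict Int Int) i =>
      cnt2.keys.foldl (fun st j =>
        if st.1.contains (i, j) = true ∨ st.1.contains (j, i) = true then st
        else
          let visit := st.1.add (i, j)
          if i = j then
            (visit, st.2.insert (i * j) (st.2.getD (i * j) 0 +
              PySem.Int.floordiv (cnt2.getD i 0 * (cnt2.getD i 0 - 1)) 2))
          else
            (visit, st.2.insert (i * j) (st.2.getD (i * j) 0 + cnt2.getD i 0 * cnt2.getD j 0)))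
        st)
    ((PySem.Set.empty : PySem.Set (Int × Int)), (PySem.Dict.empty : PySem.Dict Int Int))
  let muti := st.2
  cnt1.keys.foldl (fun res num =>
    if muti.contains (num * num) = true then res + cnt1.getD num 0 * muti.getD (num * num) 0
    else res) 0

-- ===== PORT B =====
def count_alt (nums1 : List Int) (nums2 : List Int) : Int :=
  let cnt1 := nums1.foldl (fun d v => d.insert v (d.getD v 0 + 1)) PySem.Dict.empty
  let cnt2 := nums2.foldl (fun d v => d.insert v (d.getD v 0 + 1)) PySem.Dict.empty
  let n : Int := (nums2.length : Int)
  let z := cnt2.getD 0 0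
  cnt1.keys.foldl (fun res x =>
    let s := x * x
    let p :=
      if s = 0 then z * (n - z) + PySem.Int.floordiv (z * (z - 1)) 2
      else cnt2.keys.foldl (fun p d =>
        if d ≠ 0 ∧ PySem.Int.mod s d = 0 then
          let e := PySem.Int.floordiv s d
          if d = e then p + PySem.Int.floordiv (cnt2.getD d 0 * (cnt2.getD d 0 - 1)) 2
          else if d < e ∧ cnt2.contains e = true then p + cnt2.getD d 0 * cnt2.getD e 0
          else p
        else p) 0
    res + cnt1.getD x 0 * p) 0

-- ===== PRECONDITION & SPEC =====
def Spec_count (nums1 : List Int) (nums2 : List Int) (out : Int) : Prop := out = count_alt nums1 nums2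
instance (nums1 : List Int) (nums2 : List Int) (out : Int) : Decidable (Spec_count nums1 nums2 out) := by unfold Spec_count; infer_instance

-- ===== CLAIM (what is proved, stated in full; the proofs are below) =====
def Claim_equal_count : Prop := ∀ (nums1 : List Int) (nums2 : List Int), Dom_count nums1 nums2 → Spec_count nums1 nums2 (count nums1 nums2)

-- ===== LEMMAS AND PROOFS =====

-- weight of a same-value pair with multiplicity m: m*(m-1)//2
def diagW (m : Int) : Int := PySem.Int.floordiv (m * (m - 1)) 2

-- sum over j ∈ t of the cross weight of the (i, j) value pair whose product is s
def rowSum (c : Int → Int) (s i : Int) (t : List Int) : Int :=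
  (t.map (fun j => if i * j = s then c i * c j else 0)).sum

-- total weight of unordered pairs (with repetition) of elements of ks whose product is s,
-- organised exactly like A's visit-filtered double loop: each head pairs with itself and
-- with everything after it
def pairSum (c : Int → Int) (s : Int) : List Int → Int
  | [] => 0
  | i :: t => ((if i * i = s then diagW (c i) else 0) + rowSum c s i t) + pairSum c s t

def strictPairs (c : Int → Int) (s : Int) : List Int → Int
  | [] => 0
  | i :: t => rowSum c s i t + strictPairs c s t

def diagCSum (c : Int → Int) (s : Int) (ks : List Int) : Int :=
  (ks.map (fun i => if i * i = s then diagW (c i) else 0)).sum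

def diagSqSum (c : Int → Int) (s : Int) (ks : List Int) : Int :=
  (ks.map (fun i => if i * i = s then c i * c i else 0)).sum

def fullSum (c : Int → Int) (s : Int) (ks : List Int) : Int :=
  (ks.map (fun i => rowSum c s i ks)).sum

-- A's inner-loop body, named for the proofs (definitionally the lambda of the port)
def innerStep (cnt2 : PySem.Dict Int Int) (i : Int)
    (st : PySem.Set (Int × Int) × PySem.Dict Int Int) (j : Int) :
    PySem.Set (Int × Int) × PySem.Dict Int Int :=
  if st.1.contains (i, j) = true ∨ st.1.contains (j, i) = true then st
  else
    let visit := st.1.add (i, j)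
    if i = j then
      (visit, st.2.insert (i * j) (st.2.getD (i * j) 0 +
        PySem.Int.floordiv (cnt2.getD i 0 * (cnt2.getD i 0 - 1)) 2))
    else
      (visit, st.2.insert (i * j) (st.2.getD (i * j) 0 + cnt2.getD i 0 * cnt2.getD j 0))

def cFun (cnt2 : PySem.Dict Int Int) : Int → Int := fun v => cnt2.getD v 0

-- "v is u itself or occurs after (an occurrence of) u in ks"
def afterEq (ks : List Int) (u v : Int) : Prop :=
  ∃ p q, ks = p ++ u :: q ∧ (v = u ∨ v ∈ q)


theorem rowSum_cons (c : Int → Int) (s i j : Int) (t : List Int) :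
    rowSum c s i (j :: t) = (if i * j = s then c i * c j else 0) + rowSum c s i t := by
  simp [rowSum]

theorem pairSum_eq (c : Int → Int) (s : Int) (ks : List Int) :
    pairSum c s ks = diagCSum c s ks + strictPairs c s ks := by
  induction ks with
  | nil => simp [pairSum, diagCSum, strictPairs]
  | cons i t ih => simp [pairSum, diagCSum, strictPairs] at *; omega

theorem sym_lemma (c : Int → Int) (s : Int) (ks : List Int) :
    2 * strictPairs c s ks = fullSum c s ks - diagSqSum c s ks := by
  induction ks with
  | nil => simp [strictPairs, fullSum, diagSqSum]
  | cons i t ih =>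
    have hrow : ∀ x : Int, rowSum c s x (i :: t) =
        (if x * i = s then c x * c i else 0) + rowSum c s x t := fun x => rowSum_cons c s x i t
    have hswap : (t.map (fun x => if x * i = s then c x * c i else 0)).sum = rowSum c s i t := by
      unfold rowSum
      congr 1
      apply List.map_congr_left
      intro x _
      rw [mul_comm x i, mul_comm (c x) (c i)]
    have htail : (t.map (fun x => rowSum c s x (i :: t))).sum
        = rowSum c s i t + (t.map (fun x => rowSum c s x t)).sum := by
      calc (t.map (fun x => rowSum c s x (i :: t))).sum
          = (t.map (fun x => (if x * i = s then c x * c i else 0) + rowSum c s x t)).sum :=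
            congrArg List.sum (List.map_congr_left (fun x _ => hrow x))
        _ = _ := by rw [PySem.List.sum_map_add_int, hswap]
    have hfull : fullSum c s (i :: t) =
        ((if i * i = s then c i * c i else 0) + rowSum c s i t)
          + (rowSum c s i t + fullSum c s t) := by
      unfold fullSum
      simp only [List.map_cons, List.sum_cons]
      rw [htail, hrow i]
    have hd : diagSqSum c s (i :: t) = (if i * i = s then c i * c i else 0) + diagSqSum c s t := by
      simp [diagSqSum]
    simp only [strictPairs] at *
    omega

theorem sum_pick (h : Int → Int) (e : Int) (ks : List Int) (hnd : ks.Nodup) :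
    (ks.map (fun j => if j = e then h j else 0)).sum = if e ∈ ks then h e else 0 := by
  induction ks with
  | nil => simp
  | cons i t ih =>
    rcases List.nodup_cons.mp hnd with ⟨hi, ht⟩
    by_cases hie : i = e
    · subst hie
      have : (t.map (fun j => if j = i then h j else 0)).sum = 0 := by
        rw [ih ht]
        simp [hi]
      simp [this]
    · rw [List.map_cons, List.sum_cons, if_neg hie, ih ht]
      simp [List.mem_cons, show ¬ e = i from fun h => hie h.symm]

theorem floordiv_of_dvd (a b : Int) (hb : b ≠ 0) (h : b ∣ a) :
    PySem.Int.floordiv a b = a / b := by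
  have hm : PySem.Int.mod a b = 0 := (PySem.Int.mod_eq_zero_iff_dvd a b).mpr h
  have := PySem.Int.floordiv_mul_add_mod a b
  rw [hm, add_zero] at this
  have h2 : (PySem.Int.floordiv a b * b) / b = PySem.Int.floordiv a b := Int.mul_ediv_cancel _ hb
  rw [this] at h2
  exact h2.symm

theorem sq_iff (s i : Int) (hs : s ≠ 0) : i * i = s ↔ (i ≠ 0 ∧ i ∣ s ∧ s / i = i) := by
  constructor
  · rintro rfl
    have hi : i ≠ 0 := by rintro rfl; simp at hs
    exact ⟨hi, dvd_mul_left i i, Int.mul_ediv_cancel_left i hi⟩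
  · rintro ⟨hi, hdvd, hq⟩
    have := Int.ediv_mul_cancel hdvd
    rw [hq] at this
    exact this

theorem rowSum_eval (c : Int → Int) (s i : Int) (ks : List Int) (hnd : ks.Nodup) (hs : s ≠ 0) :
    rowSum c s i ks = if i ≠ 0 ∧ i ∣ s ∧ s / i ∈ ks then c i * c (s / i) else 0 := by
  by_cases hi : i = 0
  · subst hi
    have : ∀ j ∈ ks, (if 0 * j = s then c 0 * c j else 0) = 0 := by
      intro j _
      rw [if_neg]
      intro h; apply hs; rw [← h]; ring
    unfold rowSum
    rw [List.map_congr_left this]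
    simp
  · have key : ∀ j : Int, (i * j = s) ↔ (j = s / i ∧ i ∣ s) := by
      intro j
      constructor
      · rintro rfl
        exact ⟨(Int.mul_ediv_cancel_left j hi).symm, Dvd.intro j rfl⟩
      · rintro ⟨rfl, hdvd⟩
        exact Int.mul_ediv_cancel' hdvd
    have : ∀ j ∈ ks, (if i * j = s then c i * c j else 0)
        = (if j = s / i then (if i ∣ s then c i * c j else 0) else 0) := by
      intro j _
      by_cases h2 : j = s / i
      · subst h2
        by_cases h3 : i ∣ s
        · simp [h3, (key _).mpr ⟨rfl, h3⟩]
        · have h1 : ¬ i * (s / i) = s := fun hc => h3 ((key _).mp hc).2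
          simp [h1, h3]
      · have h1 : ¬ i * j = s := fun hc => h2 ((key j).mp hc).1
        simp [h1, h2]
    unfold rowSum
    rw [List.map_congr_left this, sum_pick (fun j => if i ∣ s then c i * c j else 0) (s/i) ks hnd]
    by_cases hdvd : i ∣ s <;> by_cases hmem : s / i ∈ ks <;> simp [hdvd, hmem, hi]

theorem key_facts (s d : Int) (hs : s ≠ 0) (_hd : d ≠ 0) (hdvd : d ∣ s) :
    s / d ≠ 0 ∧ (s / d) ∣ s ∧ s / (s / d) = d := by
  have hmul : s / d * d = s := Int.ediv_mul_cancel hdvd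
  have hne : s / d ≠ 0 := by
    intro h0; rw [h0, zero_mul] at hmul; exact hs hmul.symm
  have hcancel : (s / d) * d / (s / d) = d := Int.mul_ediv_cancel_left d hne
  rw [hmul] at hcancel
  exact ⟨hne, ⟨d, hmul.symm⟩, hcancel⟩

theorem gt_eq_lt (c : Int → Int) (s : Int) (ks : List Int) (hnd : ks.Nodup) (hs : s ≠ 0) :
    (ks.map (fun d => if d ≠ 0 ∧ d ∣ s ∧ s / d < d ∧ s / d ∈ ks then c d * c (s / d) else 0)).sum
      = (ks.map (fun d => if d ≠ 0 ∧ d ∣ s ∧ d < s / d ∧ s / d ∈ ks then c d * c (s / d) else 0)).sum := by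
  classical
  rw [← List.sum_toFinset _ hnd, ← List.sum_toFinset _ hnd, ← Finset.sum_filter, ← Finset.sum_filter]
  refine Finset.sum_nbij' (fun d => s / d) (fun d => s / d) ?_ ?_ ?_ ?_ ?_
  · intro a ha
    simp only [Finset.mem_filter, List.mem_toFinset] at ha ⊢
    obtain ⟨hmem, h0, hdvd, hlt, hmem2⟩ := ha
    obtain ⟨hne, hdvd2, hcancel⟩ := key_facts s a hs h0 hdvd
    refine ⟨hmem2, hne, hdvd2, ?_, ?_⟩ <;> rw [hcancel]
    · exact hlt
    · exact hmem
  · intro a ha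
    simp only [Finset.mem_filter, List.mem_toFinset] at ha ⊢
    obtain ⟨hmem, h0, hdvd, hlt, hmem2⟩ := ha
    obtain ⟨hne, hdvd2, hcancel⟩ := key_facts s a hs h0 hdvd
    refine ⟨hmem2, hne, hdvd2, ?_, ?_⟩ <;> rw [hcancel]
    · exact hlt
    · exact hmem
  · intro a ha
    simp only [Finset.mem_filter, List.mem_toFinset] at ha
    exact (key_facts s a hs ha.2.1 ha.2.2.1).2.2
  · intro a ha
    simp only [Finset.mem_filter, List.mem_toFinset] at ha
    exact (key_facts s a hs ha.2.1 ha.2.2.1).2.2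
  · intro a ha
    simp only [Finset.mem_filter, List.mem_toFinset] at ha
    rw [(key_facts s a hs ha.2.1 ha.2.2.1).2.2, mul_comm]

theorem fullSum_eval (c : Int → Int) (s : Int) (ks : List Int) (hnd : ks.Nodup) (hs : s ≠ 0) :
    fullSum c s ks
      = (ks.map (fun d => if d ≠ 0 ∧ d ∣ s ∧ s / d ∈ ks then c d * c (s / d) else 0)).sum := by
  unfold fullSum
  congr 1
  exact List.map_congr_left (fun d _ => rowSum_eval c s d ks hnd hs)

theorem diagB_eq (c : Int → Int) (s : Int) (ks : List Int) (hs : s ≠ 0) :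
    (ks.map (fun d => if d ≠ 0 ∧ d ∣ s ∧ s / d = d then diagW (c d) else 0)).sum
      = diagCSum c s ks := by
  unfold diagCSum
  congr 1
  apply List.map_congr_left
  intro d _
  by_cases h : d * d = s
  · rw [if_pos h, if_pos]
    exact (sq_iff s d hs).mp h
  · rw [if_neg h, if_neg]
    intro hc; exact h ((sq_iff s d hs).mpr hc)

theorem ltSum_eq_strictPairs (c : Int → Int) (s : Int) (ks : List Int)
    (hnd : ks.Nodup) (hs : s ≠ 0) :
    (ks.map (fun d => if d ≠ 0 ∧ d ∣ s ∧ d < s / d ∧ s / d ∈ ks then c d * c (s / d) else 0)).sum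
      = strictPairs c s ks := by
  have htri : ∀ d ∈ ks, (if d ≠ 0 ∧ d ∣ s ∧ s / d ∈ ks then c d * c (s / d) else 0)
      = ((if d ≠ 0 ∧ d ∣ s ∧ d < s / d ∧ s / d ∈ ks then c d * c (s / d) else 0)
          + (if d ≠ 0 ∧ d ∣ s ∧ s / d < d ∧ s / d ∈ ks then c d * c (s / d) else 0))
        + (if d * d = s then c d * c d else 0) := by
    intro d hd
    by_cases h : d ≠ 0 ∧ d ∣ s ∧ s / d ∈ ks
    · obtain ⟨h0, hdvd, hmem⟩ := h
      rcases lt_trichotomy d (s / d) with hlt | heq | hgt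
      · have hn1 : ¬ (d ≠ 0 ∧ d ∣ s ∧ s / d < d ∧ s / d ∈ ks) := by
          rintro ⟨-, -, hlt2, -⟩; omega
        have hne : ¬ d * d = s := by
          intro hsq
          obtain ⟨-, -, heq2⟩ := (sq_iff s d hs).mp hsq
          omega
        rw [if_pos ⟨h0, hdvd, hmem⟩, if_pos ⟨h0, hdvd, hlt, hmem⟩, if_neg hn1, if_neg hne]
        ring
      · have hsq : d * d = s := (sq_iff s d hs).mpr ⟨h0, hdvd, heq.symm⟩
        have hn1 : ¬ (d ≠ 0 ∧ d ∣ s ∧ d < s / d ∧ s / d ∈ ks) := by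
          rintro ⟨-, -, h, -⟩; omega
        have hn2 : ¬ (d ≠ 0 ∧ d ∣ s ∧ s / d < d ∧ s / d ∈ ks) := by
          rintro ⟨-, -, h, -⟩; omega
        rw [if_pos ⟨h0, hdvd, hmem⟩, if_pos hsq, if_neg hn1, if_neg hn2, ← heq]
        ring
      · have hn1 : ¬ (d ≠ 0 ∧ d ∣ s ∧ d < s / d ∧ s / d ∈ ks) := by
          rintro ⟨-, -, hlt2, -⟩; omega
        have hne : ¬ d * d = s := by
          intro hsq
          obtain ⟨-, -, heq2⟩ := (sq_iff s d hs).mp hsq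
          omega
        rw [if_pos ⟨h0, hdvd, hmem⟩, if_neg hn1, if_pos ⟨h0, hdvd, hgt, hmem⟩, if_neg hne]
        ring
    · have h1 : ¬ (d ≠ 0 ∧ d ∣ s ∧ d < s / d ∧ s / d ∈ ks) := by
        intro hc; exact h ⟨hc.1, hc.2.1, hc.2.2.2⟩
      have h2 : ¬ (d ≠ 0 ∧ d ∣ s ∧ s / d < d ∧ s / d ∈ ks) := by
        intro hc; exact h ⟨hc.1, hc.2.1, hc.2.2.2⟩
      have h3 : ¬ d * d = s := by
        intro hsq
        obtain ⟨h0, hdvd, heq⟩ := (sq_iff s d hs).mp hsq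
        exact h ⟨h0, hdvd, by rw [heq]; exact hd⟩
      rw [if_neg h, if_neg h1, if_neg h2, if_neg h3]
      ring
  have hfull : fullSum c s ks
      = ((ks.map (fun d => if d ≠ 0 ∧ d ∣ s ∧ d < s / d ∧ s / d ∈ ks then c d * c (s / d) else 0)).sum
          + (ks.map (fun d => if d ≠ 0 ∧ d ∣ s ∧ s / d < d ∧ s / d ∈ ks then c d * c (s / d) else 0)).sum)
        + diagSqSum c s ks := by
    rw [fullSum_eval c s ks hnd hs]
    calc (ks.map (fun d => if d ≠ 0 ∧ d ∣ s ∧ s / d ∈ ks then c d * c (s / d) else 0)).sum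
        = (ks.map (fun d =>
            ((if d ≠ 0 ∧ d ∣ s ∧ d < s / d ∧ s / d ∈ ks then c d * c (s / d) else 0)
              + (if d ≠ 0 ∧ d ∣ s ∧ s / d < d ∧ s / d ∈ ks then c d * c (s / d) else 0))
            + (if d * d = s then c d * c d else 0))).sum :=
          congrArg List.sum (List.map_congr_left htri)
      _ = _ := by
          rw [PySem.List.sum_map_add_int, PySem.List.sum_map_add_int]
          rfl
  have hsym := sym_lemma c s ks
  have hswap := gt_eq_lt c s ks hnd hs
  omega

-- B's divisor scan computes pairSum, for s ≠ 0
theorem scan_eq_pairSum (cnt2 : PySem.Dict Int Int) (s : Int)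
    (hs : s ≠ 0) (hnd : cnt2.keys.Nodup) :
    cnt2.keys.foldl (fun p d =>
      if d ≠ 0 ∧ PySem.Int.mod s d = 0 then
        let e := PySem.Int.floordiv s d
        if d = e then p + PySem.Int.floordiv (cnt2.getD d 0 * (cnt2.getD d 0 - 1)) 2
        else if d < e ∧ cnt2.contains e = true then p + cnt2.getD d 0 * cnt2.getD e 0
        else p
      else p) 0 = pairSum (cFun cnt2) s cnt2.keys := by
  set ks := cnt2.keys with hks
  have hstep : ∀ (p : Int), ∀ d ∈ ks, (fun (p : Int) (d : Int) =>
      if d ≠ 0 ∧ PySem.Int.mod s d = 0 then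
        let e := PySem.Int.floordiv s d
        if d = e then p + PySem.Int.floordiv (cnt2.getD d 0 * (cnt2.getD d 0 - 1)) 2
        else if d < e ∧ cnt2.contains e = true then p + cnt2.getD d 0 * cnt2.getD e 0
        else p
      else p) p d
      = p + ((if d ≠ 0 ∧ d ∣ s ∧ s / d = d then diagW (cFun cnt2 d) else 0)
           + (if d ≠ 0 ∧ d ∣ s ∧ d < s / d ∧ s / d ∈ ks
                then cFun cnt2 d * cFun cnt2 (s / d) else 0)) := by
    intro p d _
    simp only []
    by_cases h1 : d ≠ 0 ∧ PySem.Int.mod s d = 0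
    · rw [if_pos h1]
      obtain ⟨hd0, hm⟩ := h1
      have hdvd : d ∣ s := (PySem.Int.mod_eq_zero_iff_dvd s d).mp hm
      have hfd : PySem.Int.floordiv s d = s / d := floordiv_of_dvd s d hd0 hdvd
      simp only [hfd]
      by_cases h2 : d = s / d
      · have hn : ¬ (d ≠ 0 ∧ d ∣ s ∧ d < s / d ∧ s / d ∈ ks) := by
          rintro ⟨-, -, hlt, -⟩; omega
        rw [if_pos h2, if_pos ⟨hd0, hdvd, h2.symm⟩, if_neg hn]
        simp only [diagW, cFun]
        ring
      · have hn : ¬ (d ≠ 0 ∧ d ∣ s ∧ s / d = d) := by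
          rintro ⟨-, -, he⟩; exact h2 he.symm
        rw [if_neg h2, if_neg hn]
        by_cases h3 : d < s / d ∧ cnt2.contains (s / d) = true
        · have hmem : s / d ∈ ks := (PySem.Dict.contains_iff_mem_keys cnt2 (s / d)).mp h3.2
          rw [if_pos h3, if_pos ⟨hd0, hdvd, h3.1, hmem⟩]
          simp only [cFun]
          ring
        · have hn2 : ¬ (d ≠ 0 ∧ d ∣ s ∧ d < s / d ∧ s / d ∈ ks) := by
            rintro ⟨-, -, hlt, hmem⟩
            exact h3 ⟨hlt, (PySem.Dict.contains_iff_mem_keys cnt2 (s / d)).mpr hmem⟩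
          rw [if_neg h3, if_neg hn2]
          ring
    · have hn1 : ¬ (d ≠ 0 ∧ d ∣ s ∧ s / d = d) := by
        rintro ⟨hd0, hdvd, -⟩
        exact h1 ⟨hd0, (PySem.Int.mod_eq_zero_iff_dvd s d).mpr hdvd⟩
      have hn2 : ¬ (d ≠ 0 ∧ d ∣ s ∧ d < s / d ∧ s / d ∈ ks) := by
        rintro ⟨hd0, hdvd, -, -⟩
        exact h1 ⟨hd0, (PySem.Int.mod_eq_zero_iff_dvd s d).mpr hdvd⟩
      rw [if_neg h1, if_neg hn1, if_neg hn2]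
      ring
  rw [PySem.List.foldl_congr_mem ks _ _ 0 (fun p d hd => hstep p d hd)]
  rw [PySem.List.foldl_add, PySem.List.sum_map_add_int]
  rw [diagB_eq (cFun cnt2) s ks hs, ltSum_eq_strictPairs (cFun cnt2) s ks hnd hs, pairSum_eq]
  ring

theorem diagW_zero : diagW 0 = 0 := by decide

theorem pairSum_zero_abstract (c : Int → Int) (ks : List Int) (hnd : ks.Nodup)
    (n : Int) (hn : (ks.map c).sum = n) (hz : 0 ∉ ks → c 0 = 0) :
    pairSum c 0 ks = c 0 * (n - c 0) + diagW (c 0) := by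
  have hdiagC : diagCSum c 0 ks = if 0 ∈ ks then diagW (c 0) else 0 := by
    unfold diagCSum
    have : ∀ i ∈ ks, (if i * i = 0 then diagW (c i) else 0)
        = (if i = 0 then diagW (c i) else 0) := by
      intro i _
      by_cases h : i = 0 <;> simp [h]
    rw [List.map_congr_left this, sum_pick (fun i => diagW (c i)) 0 ks hnd]
  have hdiagSq : diagSqSum c 0 ks = if 0 ∈ ks then c 0 * c 0 else 0 := by
    unfold diagSqSum
    have : ∀ i ∈ ks, (if i * i = 0 then c i * c i else 0)
        = (if i = 0 then c i * c i else 0) := by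
      intro i _
      by_cases h : i = 0 <;> simp [h]
    rw [List.map_congr_left this, sum_pick (fun i => c i * c i) 0 ks hnd]
  have hrow : ∀ i ∈ ks, rowSum c 0 i ks
      = if i = 0 then c 0 * n else (if (0:Int) ∈ ks then c i * c 0 else 0) := by
    intro i _
    by_cases h : i = 0
    · subst h
      rw [if_pos rfl]
      unfold rowSum
      have : ∀ j ∈ ks, (if (0:Int) * j = 0 then c 0 * c j else 0) = c 0 * c j := by
        intro j _; simp
      rw [List.map_congr_left this, List.sum_map_mul_left, hn]
    · rw [if_neg h]
      unfold rowSum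
      have : ∀ j ∈ ks, (if i * j = 0 then c i * c j else 0)
          = (if j = 0 then c i * c j else 0) := by
        intro j _
        by_cases hj : j = 0
        · simp [hj]
        · rw [if_neg hj, if_neg (by simp [h, hj] : ¬ i * j = 0)]
      rw [List.map_congr_left this, sum_pick (fun j => c i * c j) 0 ks hnd]
  have hsym := sym_lemma c 0 ks
  have hps := pairSum_eq c 0 ks
  by_cases hmem : (0:Int) ∈ ks
  · have hfull : fullSum c 0 ks = c 0 * n + n * c 0 - c 0 * c 0 := by
      unfold fullSum
      rw [List.map_congr_left hrow]
      have : ∀ i ∈ ks, (if i = 0 then c 0 * n else (if (0:Int) ∈ ks then c i * c 0 else 0))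
          = (if i = 0 then c 0 * n - c i * c 0 else 0) + c i * c 0 := by
        intro i _
        by_cases h : i = 0
        · subst h
          rw [if_pos rfl, if_pos rfl]
          ring
        · simp [h, hmem]
      rw [List.map_congr_left this, PySem.List.sum_map_add_int,
        sum_pick (fun i => c 0 * n - c i * c 0) 0 ks hnd, List.sum_map_mul_right, hn,
        if_pos hmem]
      ring
    rw [hps, hdiagC, if_pos hmem]
    rw [hfull, hdiagSq, if_pos hmem] at hsym
    linarith
  · have hc0 : c 0 = 0 := hz hmem
    have hfull : fullSum c 0 ks = 0 := by
      unfold fullSum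
      rw [List.map_congr_left hrow]
      have : ∀ i ∈ ks, (if i = 0 then c 0 * n else (if (0:Int) ∈ ks then c i * c 0 else 0))
          = 0 := by
        intro i hi
        have hne : i ≠ 0 := by rintro rfl; exact hmem hi
        rw [if_neg hne, if_neg hmem]
      rw [List.map_congr_left this]
      simp
    rw [hps, hdiagC, if_neg hmem]
    rw [hfull, hdiagSq, if_neg hmem] at hsym
    rw [hc0, diagW_zero]
    linarith

theorem foldl_id {α β : Type} (l : List α) (f : β → α → β) (b : β)
    (h : ∀ x ∈ l, f b x = b) : l.foldl f b = b := by
  induction l with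
  | nil => rfl
  | cons x t ih =>
    rw [List.foldl_cons, h x List.mem_cons_self]
    exact ih (fun y hy => h y (List.mem_cons_of_mem x hy))

theorem tail_unique {u : Int} : ∀ (pre p q t : List Int),
    pre ++ u :: t = p ++ u :: q → u ∉ pre → u ∉ p → t = q := by
  intro pre
  induction pre with
  | nil =>
    intro p q t h hu hp
    cases p with
    | nil => simpa using h
    | cons a p' =>
      simp only [List.nil_append, List.cons_append, List.cons.injEq] at h
      exact absurd (h.1 ▸ List.mem_cons_self) hp
  | cons a pre' ih =>
    intro p q t h hu hp
    cases p with
    | nil =>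
      simp only [List.cons_append, List.nil_append, List.cons.injEq] at h
      exact absurd (h.1.symm ▸ List.mem_cons_self) hu
    | cons b p' =>
      simp only [List.cons_append, List.cons.injEq] at h
      exact ih p' q t h.2 (fun hm => hu (List.mem_cons_of_mem a hm))
        (fun hm => hp (List.mem_cons_of_mem b hm))

theorem afterEq_unique (ks : List Int) (hnd : ks.Nodup) (pre t : List Int) (u : Int)
    (h : ks = pre ++ u :: t) : ∀ v, afterEq ks u v ↔ (v = u ∨ v ∈ t) := by
  intro v
  constructor
  · rintro ⟨p, q, hq, hv⟩
    have hupre : u ∉ pre := by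
      intro hm
      rw [h] at hnd
      rcases List.nodup_append.mp hnd with ⟨-, -, hdisj⟩
      exact hdisj u hm u List.mem_cons_self rfl
    have hup : u ∉ p := by
      intro hm
      rw [hq] at hnd
      rcases List.nodup_append.mp hnd with ⟨-, -, hdisj⟩
      exact hdisj u hm u List.mem_cons_self rfl
    have := tail_unique pre p q t (by rw [← h, ← hq]) hupre hup
    rcases hv with hv | hv
    · exact Or.inl hv
    · exact Or.inr (this ▸ hv)
  · intro hv
    exact ⟨pre, t, h, hv⟩

theorem afterEq_of_mem_pre (ks pre rest : List Int) (u : Int)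
    (h : ks = pre ++ rest) (hm : u ∈ pre) : ∀ v ∈ rest, afterEq ks u v := by
  intro v hv
  rcases List.append_of_mem hm with ⟨p1, p2, rfl⟩
  exact ⟨p1, p2 ++ rest, by rw [h]; simp, Or.inr (by simp [hv])⟩

theorem nodup_split_facts (pre t1 t2 : List Int) (i j : Int)
    (h : (pre ++ i :: (t1 ++ j :: t2)).Nodup) :
    i ∉ pre ∧ j ∉ pre ∧ j ≠ i ∧ j ∉ t1 ∧ j ∉ t2 := by
  rcases List.nodup_append.mp h with ⟨-, hr, hdisj⟩
  rcases List.nodup_cons.mp hr with ⟨hi, ht⟩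
  rcases List.nodup_append.mp ht with ⟨-, hjt, hdisj2⟩
  rcases List.nodup_cons.mp hjt with ⟨hjt2, -⟩
  refine ⟨fun hm => hdisj i hm i List.mem_cons_self rfl, ?_, ?_, ?_, hjt2⟩
  · intro hm
    exact hdisj j hm j (List.mem_cons_of_mem i (by simp)) rfl
  · intro hm
    exact hi (hm ▸ (by simp : j ∈ t1 ++ j :: t2))
  · intro hm
    exact hdisj2 j hm j (by simp) rfl

theorem inner_tail (cnt2 : PySem.Dict Int Int) (ks : List Int) (hnd : ks.Nodup)
    (i : Int) (pre : List Int) :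
    ∀ (t2 t1 : List Int) (V : PySem.Set (Int × Int)) (d : PySem.Dict Int Int),
    ks = pre ++ i :: (t1 ++ t2) →
    (∀ u v : Int, (u, v) ∈ V ↔ ((u ∈ pre ∧ afterEq ks u v) ∨ (u = i ∧ (v = i ∨ v ∈ t1)))) →
    (∀ u v : Int, (u, v) ∈ (t2.foldl (innerStep cnt2 i) (V, d)).1 ↔
        ((u ∈ pre ∧ afterEq ks u v) ∨ (u = i ∧ (v = i ∨ v ∈ t1 ++ t2))))
    ∧ (∀ s : Int, (t2.foldl (innerStep cnt2 i) (V, d)).2.getD s 0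
        = d.getD s 0 + rowSum (cFun cnt2) s i t2) := by
  intro t2
  induction t2 with
  | nil =>
    intro t1 V d hsplit hV
    simp only [List.foldl_nil]
    exact ⟨fun u v => by rw [hV u v]; simp, fun s => by simp [rowSum]⟩
  | cons j t2' ih =>
    intro t1 V d hsplit hV
    obtain ⟨hipre, hjpre, hji, hjt1, hjt2⟩ := nodup_split_facts pre t1 t2' i j (hsplit ▸ hnd)
    have hskip : ¬ (V.contains (i, j) = true ∨ V.contains (j, i) = true) := by
      rintro (hc | hc)
      · rcases (hV i j).mp ((PySem.Set.contains_iff V (i, j)).mp hc) with ⟨hm, -⟩ | ⟨-, hm | hm⟩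
        · exact hipre hm
        · exact hji hm
        · exact hjt1 hm
      · rcases (hV j i).mp ((PySem.Set.contains_iff V (j, i)).mp hc) with ⟨hm, -⟩ | ⟨hm, -⟩
        · exact hjpre hm
        · exact hji hm
    have hstep : innerStep cnt2 i (V, d) j
        = (V.add (i, j), d.insert (i * j) (d.getD (i * j) 0 + cnt2.getD i 0 * cnt2.getD j 0)) := by
      unfold innerStep
      rw [if_neg hskip, if_neg (fun h => hji h.symm)]
    rw [List.foldl_cons, hstep]
    have hsplit' : ks = pre ++ i :: ((t1 ++ [j]) ++ t2') := by
      rw [hsplit]; simp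
    have hV' : ∀ u v : Int, (u, v) ∈ V.add (i, j) ↔
        ((u ∈ pre ∧ afterEq ks u v) ∨ (u = i ∧ (v = i ∨ v ∈ t1 ++ [j]))) := by
      intro u v
      rw [PySem.Set.mem_add, hV u v, Prod.mk.injEq]
      simp only [List.mem_append, List.mem_singleton]
      tauto
    obtain ⟨hVfin, hdfin⟩ := ih (t1 ++ [j]) (V.add (i, j))
      (d.insert (i * j) (d.getD (i * j) 0 + cnt2.getD i 0 * cnt2.getD j 0)) hsplit' hV'
    constructor
    · intro u v
      rw [hVfin u v]
      simp only [List.mem_append, List.mem_cons]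
      tauto
    · intro s
      rw [hdfin s, rowSum_cons, PySem.Dict.getD_insert]
      by_cases hc : s = i * j
      · subst hc
        rw [if_pos rfl, if_pos rfl]
        simp only [cFun]
        ring
      · rw [if_neg hc, if_neg (fun h => hc h.symm)]
        ring

theorem inner_full (cnt2 : PySem.Dict Int Int) (ks : List Int) (hnd : ks.Nodup)
    (i : Int) (pre t : List Int) (hsplit : ks = pre ++ i :: t)
    (V : PySem.Set (Int × Int)) (d : PySem.Dict Int Int)
    (hV : ∀ u v : Int, (u, v) ∈ V ↔ (u ∈ pre ∧ afterEq ks u v)) :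
    (∀ u v : Int, (u, v) ∈ (ks.foldl (innerStep cnt2 i) (V, d)).1 ↔
        (u ∈ pre ++ [i] ∧ afterEq ks u v))
    ∧ (∀ s : Int, (ks.foldl (innerStep cnt2 i) (V, d)).2.getD s 0
        = d.getD s 0 + ((if i * i = s then diagW (cFun cnt2 i) else 0)
            + rowSum (cFun cnt2) s i t)) := by
  have hipre : i ∉ pre := by
    rw [hsplit] at hnd
    rcases List.nodup_append.mp hnd with ⟨-, -, hdisj⟩
    exact fun hm => hdisj i hm i List.mem_cons_self rfl
  -- the fold over ks = pre ++ i :: t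
  rw [show ks.foldl (innerStep cnt2 i) (V, d)
      = (i :: t).foldl (innerStep cnt2 i) (pre.foldl (innerStep cnt2 i) (V, d)) by
    rw [← List.foldl_append, ← hsplit]]
  -- prefix: every j ∈ pre is skipped
  have hpre : pre.foldl (innerStep cnt2 i) (V, d) = (V, d) := by
    apply foldl_id
    intro j hj
    have hc : V.contains (j, i) = true := by
      rw [PySem.Set.contains_iff]
      exact (hV j i).mpr ⟨hj, afterEq_of_mem_pre ks pre (i :: t) j hsplit hj i List.mem_cons_self⟩
    unfold innerStep
    rw [if_pos (Or.inr hc)]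
  rw [hpre, List.foldl_cons]
  -- the diagonal step at i
  have hskip : ¬ (V.contains (i, i) = true ∨ V.contains (i, i) = true) := by
    rintro (hc | hc) <;>
      exact hipre ((hV i i).mp ((PySem.Set.contains_iff V (i, i)).mp hc)).1
  have hstep : innerStep cnt2 i (V, d) i
      = (V.add (i, i), d.insert (i * i) (d.getD (i * i) 0 +
          PySem.Int.floordiv (cnt2.getD i 0 * (cnt2.getD i 0 - 1)) 2)) := by
    unfold innerStep
    rw [if_neg hskip, if_pos rfl]
  rw [hstep]
  have hV' : ∀ u v : Int, (u, v) ∈ V.add (i, i) ↔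
      ((u ∈ pre ∧ afterEq ks u v) ∨ (u = i ∧ (v = i ∨ v ∈ ([] : List Int)))) := by
    intro u v
    rw [PySem.Set.mem_add, hV u v, Prod.mk.injEq]
    simp only [List.mem_nil_iff, or_false]
  obtain ⟨hVfin, hdfin⟩ := inner_tail cnt2 ks hnd i pre t []
    (V.add (i, i))
    (d.insert (i * i) (d.getD (i * i) 0 +
      PySem.Int.floordiv (cnt2.getD i 0 * (cnt2.getD i 0 - 1)) 2))
    (by simpa using hsplit) hV'
  constructor
  · intro u v
    rw [hVfin u v]
    have hae := afterEq_unique ks hnd pre t i hsplit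
    simp only [List.nil_append, List.mem_append, List.mem_singleton]
    constructor
    · rintro (⟨hm, ha⟩ | ⟨rfl, hv⟩)
      · exact ⟨Or.inl hm, ha⟩
      · exact ⟨Or.inr rfl, (hae v).mpr hv⟩
    · rintro ⟨hm | rfl, ha⟩
      · exact Or.inl ⟨hm, ha⟩
      · exact Or.inr ⟨rfl, (hae v).mp ha⟩
  · intro s
    rw [hdfin s, PySem.Dict.getD_insert]
    by_cases hc : s = i * i
    · subst hc
      rw [if_pos rfl, if_pos rfl]
      simp only [cFun, diagW]
      ring
    · rw [if_neg hc, if_neg (fun h => hc h.symm)]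
      ring

theorem outer_loop (cnt2 : PySem.Dict Int Int) (ks : List Int) (hnd : ks.Nodup) :
    ∀ (suf pre : List Int) (V : PySem.Set (Int × Int)) (d : PySem.Dict Int Int),
    ks = pre ++ suf →
    (∀ u v : Int, (u, v) ∈ V ↔ (u ∈ pre ∧ afterEq ks u v)) →
    ∀ s : Int, (suf.foldl (fun st i => ks.foldl (innerStep cnt2 i) st) (V, d)).2.getD s 0
      = d.getD s 0 + pairSum (cFun cnt2) s suf := by
  intro suf
  induction suf with
  | nil =>
    intro pre V d hsplit hV s
    simp [pairSum]
  | cons i suf' ih =>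
    intro pre V d hsplit hV s
    rw [List.foldl_cons]
    obtain ⟨hVmid, hdmid⟩ := inner_full cnt2 ks hnd i pre suf' hsplit V d hV
    have hst : ks.foldl (innerStep cnt2 i) (V, d)
        = ((ks.foldl (innerStep cnt2 i) (V, d)).1, (ks.foldl (innerStep cnt2 i) (V, d)).2) := rfl
    rw [ih (pre ++ [i]) (ks.foldl (innerStep cnt2 i) (V, d)).1
      (ks.foldl (innerStep cnt2 i) (V, d)).2 (by rw [hsplit]; simp)
      (fun u v => hVmid u v) s]
    rw [hdmid s]
    simp only [pairSum]
    ring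

def mutiOf (cnt2 : PySem.Dict Int Int) : PySem.Dict Int Int :=
  (cnt2.keys.foldl (fun st i => cnt2.keys.foldl (innerStep cnt2 i) st)
    ((PySem.Set.empty : PySem.Set (Int × Int)), (PySem.Dict.empty : PySem.Dict Int Int))).2

theorem muti_getD (cnt2 : PySem.Dict Int Int) (hnd : cnt2.keys.Nodup) (s : Int) :
    (mutiOf cnt2).getD s 0 = pairSum (cFun cnt2) s cnt2.keys := by
  unfold mutiOf
  rw [outer_loop cnt2 cnt2.keys hnd cnt2.keys [] PySem.Set.empty PySem.Dict.empty
    (by simp) (by intro u v; simp [PySem.Set.empty]) s, PySem.Dict.getD_empty]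
  ring

def resA (cnt1 cnt2 : PySem.Dict Int Int) : Int :=
  cnt1.keys.foldl (fun res num =>
    if (mutiOf cnt2).contains (num * num) = true
    then res + cnt1.getD num 0 * (mutiOf cnt2).getD (num * num) 0 else res) 0

def resB (cnt1 cnt2 : PySem.Dict Int Int) (n : Int) : Int :=
  cnt1.keys.foldl (fun res x =>
    let s := x * x
    let p :=
      if s = 0 then cnt2.getD 0 0 * (n - cnt2.getD 0 0)
        + PySem.Int.floordiv (cnt2.getD 0 0 * (cnt2.getD 0 0 - 1)) 2
      else cnt2.keys.foldl (fun p d =>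
        if d ≠ 0 ∧ PySem.Int.mod s d = 0 then
          let e := PySem.Int.floordiv s d
          if d = e then p + PySem.Int.floordiv (cnt2.getD d 0 * (cnt2.getD d 0 - 1)) 2
          else if d < e ∧ cnt2.contains e = true then p + cnt2.getD d 0 * cnt2.getD e 0
          else p
        else p) 0
    res + cnt1.getD x 0 * p) 0

theorem count_eq_resA (nums1 nums2 : List Int) :
    count nums1 nums2 = resA (PySem.Dict.counter nums1) (PySem.Dict.counter nums2) := by
  rw [show count nums1 nums2
      = resA (nums1.foldl (fun d num => d.insert num (d.getD num 0 + 1)) PySem.Dict.empty)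
          (nums2.foldl (fun d num => d.insert num (d.getD num 0 + 1)) PySem.Dict.empty) from rfl,
    PySem.Dict.foldl_insert_getD_add_one_eq_counter,
    PySem.Dict.foldl_insert_getD_add_one_eq_counter]

theorem count_alt_eq_resB (nums1 nums2 : List Int) :
    count_alt nums1 nums2
      = resB (PySem.Dict.counter nums1) (PySem.Dict.counter nums2) (nums2.length : Int) := by
  rw [show count_alt nums1 nums2
      = resB (nums1.foldl (fun d v => d.insert v (d.getD v 0 + 1)) PySem.Dict.empty)
          (nums2.foldl (fun d v => d.insert v (d.getD v 0 + 1)) PySem.Dict.empty)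
          (nums2.length : Int) from rfl,
    PySem.Dict.foldl_insert_getD_add_one_eq_counter,
    PySem.Dict.foldl_insert_getD_add_one_eq_counter]

theorem sum_counts (l : List Int) :
    ((PySem.Set.ofList l).map (fun v => ((l.count v : Nat) : Int))).sum = (l.length : Int) := by
  have hperm : (PySem.Set.ofList l).Perm l.dedup := by
    apply List.perm_of_nodup_nodup_toFinset_eq (PySem.Set.nodup_ofList l) l.nodup_dedup
    ext a
    simp [List.mem_toFinset, PySem.Set.mem_ofList, List.mem_dedup]
  rw [List.Perm.sum_eq (hperm.map (fun v => ((l.count v : Nat) : Int)))]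
  have : (l.dedup.map (fun v => ((l.count v : Nat) : Int))).sum
      = (((l.dedup.map (fun v => l.count v)).sum : Nat) : Int) := by
    rw [Nat.cast_list_sum, List.map_map]
    rfl
  rw [this, List.sum_map_count_dedup_eq_length]

theorem pairSum_zero_counter (nums2 : List Int) :
    pairSum (cFun (PySem.Dict.counter nums2)) 0 (PySem.Dict.counter nums2).keys
      = (PySem.Dict.counter nums2).getD 0 0
          * ((nums2.length : Int) - (PySem.Dict.counter nums2).getD 0 0)
        + PySem.Int.floordiv ((PySem.Dict.counter nums2).getD 0 0
            * ((PySem.Dict.counter nums2).getD 0 0 - 1)) 2 := by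
  have hnd := PySem.Dict.nodup_keys_counter nums2
  have hn : ((PySem.Dict.counter nums2).keys.map (cFun (PySem.Dict.counter nums2))).sum
      = (nums2.length : Int) := by
    rw [PySem.Dict.keys_counter]
    have : ∀ v ∈ PySem.Set.ofList nums2,
        cFun (PySem.Dict.counter nums2) v = ((nums2.count v : Nat) : Int) := by
      intro v _
      simp [cFun, PySem.Dict.getD_counter]
    rw [List.map_congr_left this, sum_counts]
  have hz : (0:Int) ∉ (PySem.Dict.counter nums2).keys → cFun (PySem.Dict.counter nums2) 0 = 0 := by
    intro hm
    rw [PySem.Dict.keys_counter, PySem.Set.mem_ofList] at hm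
    simp [cFun, PySem.Dict.getD_counter, List.count_eq_zero.mpr hm]
  have := pairSum_zero_abstract (cFun (PySem.Dict.counter nums2))
    (PySem.Dict.counter nums2).keys hnd (nums2.length : Int) hn hz
  rw [this]
  rfl

theorem resA_eq_resB (nums1 nums2 : List Int) :
    resA (PySem.Dict.counter nums1) (PySem.Dict.counter nums2)
      = resB (PySem.Dict.counter nums1) (PySem.Dict.counter nums2) (nums2.length : Int) := by
  unfold resA resB
  apply PySem.List.foldl_congr_mem
  intro res x _
  have hnd := PySem.Dict.nodup_keys_counter nums2
  simp only []
  -- A's step equals the canonical value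
  have hA : (if (mutiOf (PySem.Dict.counter nums2)).contains (x * x) = true
      then res + (PySem.Dict.counter nums1).getD x 0
          * (mutiOf (PySem.Dict.counter nums2)).getD (x * x) 0 else res)
      = res + (PySem.Dict.counter nums1).getD x 0
          * pairSum (cFun (PySem.Dict.counter nums2)) (x * x) (PySem.Dict.counter nums2).keys := by
    by_cases hc : (mutiOf (PySem.Dict.counter nums2)).contains (x * x) = true
    · rw [if_pos hc, muti_getD (PySem.Dict.counter nums2) hnd (x * x)]
    · have hf : (mutiOf (PySem.Dict.counter nums2)).contains (x * x) = false := by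
        revert hc
        cases (mutiOf (PySem.Dict.counter nums2)).contains (x * x) <;> simp
      rw [if_neg hc, ← muti_getD (PySem.Dict.counter nums2) hnd (x * x),
        PySem.Dict.getD_of_not_contains _ _ hf]
      ring
  rw [hA]
  -- B's step equals the canonical value
  by_cases hx : x * x = 0
  · rw [if_pos hx, hx, pairSum_zero_counter nums2]
  · rw [if_neg hx, scan_eq_pairSum (PySem.Dict.counter nums2) (x * x) hx hnd]

-- ===== VERDICT (by name: the statement is the Claim_ definition above) =====
theorem count_spec : Claim_equal_count := by
  intro nums1 nums2 _
  unfold Spec_count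
  rw [count_eq_resA, count_alt_eq_resB, resA_eq_resB]
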